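-- pv_equiv track=rewrite | github.com/burundai-t/finite-row-graded-magmas-over-f3 | mathcal_H/verify_stage6_bundle.py | iter_domain_completions
-- ===== SOURCE A (Python) =====
-- from itertools import combinations, product
--
-- S = (0, 1, 2)
--
-- BIT = (1, 2, 4)
--
-- def mask_values(mask: int) -> list[int]:
--     return [i for i in S if mask & BIT[i]]
--
-- def singleton_mask_value(mask: int) -> int:
--     vals = mask_values(mask)
--     if len(vals) != 1:
--         raise ValueError(f"mask is not singleton: {mask}")
--     return vals[0]
--
-- def iter_domain_completions(dom: tuple[int, ...]):
--     free = [(i, mask_values(int(m))) for i, m in enumerate(dom) if int(m).bit_count() > 1]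
--     fixed = [singleton_mask_value(int(m)) if int(m).bit_count() == 1 else None for m in dom]
--     for vals in product(*[v for _, v in free]):
--         cur = list(fixed)
--         for (i, _choices), val in zip(free, vals):
--             cur[i] = val
--         yield "".join(str(int(v)) for v in cur)
-- ===== SOURCE B (Python) =====
-- S = (0, 1, 2)
--
-- BIT = (1, 2, 4)
--
-- def mask_values(mask: int) -> list[int]:
--     return [i for i in S if mask & BIT[i]]
--
-- def iter_domain_completions(dom: tuple[int, ...]):
--     # Per-position cartesian product built back-to-front: every position
--     # contributes its mask_values as the choice set (a singleton mask gives a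
--     # one-element set), so no free/fixed split, no index scatter, no join.
--     choices = [mask_values(int(m)) for m in dom]
--     out = [""]
--     for vals in reversed(choices):
--         out = [str(v) + s for v in vals for s in out]
--     yield from out
-- ===== Notes on version B (the rewrite author's own statement) =====
-- stated objective: simpler
-- what changed: Replaces A's free/fixed position split, itertools.product over the free slots and the per-tuple list copy + index scatter + join by one per-position cartesian product of the mask_values lists, built back-to-front by string accumulation (same output order).
import Mathlib
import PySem

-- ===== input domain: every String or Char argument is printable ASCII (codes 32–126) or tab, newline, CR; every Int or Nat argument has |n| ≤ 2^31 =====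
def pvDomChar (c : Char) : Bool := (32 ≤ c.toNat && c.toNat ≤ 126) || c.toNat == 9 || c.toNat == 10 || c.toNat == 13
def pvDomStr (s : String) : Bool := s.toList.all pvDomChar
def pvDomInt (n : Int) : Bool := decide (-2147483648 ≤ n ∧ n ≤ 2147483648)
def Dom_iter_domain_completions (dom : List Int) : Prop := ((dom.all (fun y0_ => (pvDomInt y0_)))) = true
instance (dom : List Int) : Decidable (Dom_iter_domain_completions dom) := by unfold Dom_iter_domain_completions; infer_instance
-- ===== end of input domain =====

-- B replaces A's free/fixed split + itertools.product + per-tuple index scatter by a single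
-- per-position cartesian product built back-to-front (objective: simpler; same output order).

-- ===== PORT A =====
def pyS : List Int := [0, 1, 2]

-- BIT[i] for the loop's i ∈ S = (0,1,2): tuple lookup, exact on those indices
def pyBIT (i : Int) : Int := if i = 0 then 1 else if i = 1 then 2 else 4

def mask_values (mask : Int) : List Int :=
  pyS.filter (fun i => PySem.Int.band mask (pyBIT i) != 0)

-- Python raises ValueError when len(vals) ≠ 1; `none` models the raise (excluded by Pre_)
def singleton_mask_value (mask : Int) : Option Int :=
  let vals := mask_values mask
  if vals.length ≠ 1 then none else PySem.List.pyGet? vals 0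

-- itertools.product(*lists): last factor varies fastest
def prodA : List (List Int) → List (List Int)
  | [] => [[]]
  | l :: ls => l.flatMap (fun x => (prodA ls).map (fun t => x :: t))

def freeA (dom : List Int) : List (Int × List Int) :=
  (PySem.List.enumerate dom).filterMap
    (fun p => if 1 < PySem.Int.bitCount p.2 then some (p.1, mask_values p.2) else none)

def fixedA (dom : List Int) : List (Option Int) :=
  dom.map (fun m => if PySem.Int.bitCount m = 1 then singleton_mask_value m else none)

-- the inner 'for (i, _), val in zip(free, vals): cur[i] = val' loop
def scatA (free : List (Int × List Int)) (vals : List Int) (cur : List (Option Int)) :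
    List (Option Int) :=
  (free.zip vals).foldl (fun c pv => PySem.List.pySetD c pv.1.1 (some pv.2)) cur

-- "".join(str(int(v)) for v in cur); str(int(None)) raises TypeError in Python,
-- so the getD 0 default is unreachable on inputs admitted by Pre_
def renderA (cur : List (Option Int)) : String :=
  PySem.Str.join "" (cur.map (fun v => PySem.Int.toStr (v.getD 0)))

def iter_domain_completions (dom : List Int) : List String :=
  let free := freeA dom
  let fixed := fixedA dom
  (prodA (free.map (fun p => p.2))).map (fun vals => renderA (scatA free vals fixed))

-- ===== PORT B =====
def mask_values_b (mask : Int) : List Int :=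
  ([0, 1, 2] : List Int).filter
    (fun i => PySem.Int.band mask (if i = 0 then 1 else if i = 1 then 2 else 4) != 0)

def iter_domain_completions_alt (dom : List Int) : List String :=
  let choices := dom.map (fun m => mask_values_b m)
  choices.reverse.foldl
    (fun out vals => vals.flatMap (fun v => out.map (fun s => PySem.Int.toStr v ++ s))) [""]

-- ===== PRECONDITION & SPEC =====
def pvMV (m : Int) : List Int :=
  ([0, 1, 2] : List Int).filter
    (fun i => PySem.Int.band m (if i = 0 then 1 else if i = 1 then 2 else 4) != 0)

-- Pre_ excludes exactly the inputs on which A raises: a mask whose bit_count is 1 but whose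
-- low-three-bit value list is not a singleton (ValueError), and a zero mask while every free
-- position has a nonempty value list (TypeError from str(int(None))).
def Pre_iter_domain_completions (dom : List Int) : Prop :=
  (∀ m ∈ dom, ¬(PySem.Int.bitCount m = 1 ∧ (pvMV m).length ≠ 1)) ∧
  ((0 : Int) ∈ dom → ∃ m ∈ dom, 1 < PySem.Int.bitCount m ∧ pvMV m = [])

instance (dom : List Int) : Decidable (Pre_iter_domain_completions dom) := by
  unfold Pre_iter_domain_completions; infer_instance

def pvWitness_iter_domain_completions : List Int := [3, 1, 5]

def Spec_iter_domain_completions (dom : List Int) (out : List String) : Prop :=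
  out = iter_domain_completions_alt dom
instance (dom : List Int) (out : List String) : Decidable (Spec_iter_domain_completions dom out) := by
  unfold Spec_iter_domain_completions; infer_instance

-- ===== CLAIM (what is proved, stated in full; the proofs are below) =====
def Claim_equal_iter_domain_completions : Prop :=
  ∀ (dom : List Int), Dom_iter_domain_completions dom → Pre_iter_domain_completions dom →
    Spec_iter_domain_completions dom (iter_domain_completions dom)

-- ===== LEMMAS AND PROOFS =====

-- B's recursion, made structural for the induction
def bRec : List Int → List String
  | [] => [""]
  | m :: ms => (mask_values_b m).flatMap (fun v => (bRec ms).map (fun s => PySem.Int.toStr v ++ s))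

theorem alt_eq_bRec (dom : List Int) : iter_domain_completions_alt dom = bRec dom := by
  show (List.map mask_values_b dom).reverse.foldl _ [""] = bRec dom
  rw [List.foldl_reverse]
  induction dom with
  | nil => rfl
  | cons m ms ih => simp only [List.map_cons, List.foldr_cons, bRec, ih]


theorem mask_values_b_eq (m : Int) : mask_values_b m = mask_values m := by
  rfl


theorem pvMV_eq (m : Int) : pvMV m = mask_values m := by
  rfl


theorem enum_shift (xs : List Int) (s : Int) :
    PySem.List.enumerate xs (s + 1) =
      (PySem.List.enumerate xs s).map (fun p => (p.1 + 1, p.2)) := by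
  induction xs generalizing s with
  | nil => simp [PySem.List.enumerate_nil]
  | cons x xs ih => simp [PySem.List.enumerate_cons, ih]


theorem freeA_cons (m : Int) (ms : List Int) :
    freeA (m :: ms) =
      (if 1 < PySem.Int.bitCount m then [((0 : Int), mask_values m)] else []) ++
        (freeA ms).map (fun p => (p.1 + 1, p.2)) := by
  unfold freeA
  rw [PySem.List.enumerate_cons, enum_shift, List.filterMap_cons]
  have hcong : ∀ l : List (Int × Int),
      List.filterMap (fun p : Int × Int =>
          if 1 < PySem.Int.bitCount p.2 then some (p.1 + 1, mask_values p.2) else none) l =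
        (List.filterMap (fun p : Int × Int =>
          if 1 < PySem.Int.bitCount p.2 then some (p.1, mask_values p.2) else none) l).map
          (fun p => (p.1 + 1, p.2)) := by
    intro l
    rw [List.map_filterMap]
    refine List.filterMap_congr ?_
    intro p _
    by_cases hp : 1 < PySem.Int.bitCount p.2 <;> simp [hp]
  by_cases h : 1 < PySem.Int.bitCount m <;> simp [h, List.filterMap_map, hcong]


theorem freeA_nonneg (ms : List Int) : ∀ p ∈ freeA ms, 0 ≤ p.1 := by
  intro p hp
  obtain ⟨a, ha, hg⟩ := List.mem_filterMap.1 hp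
  rw [PySem.List.mem_enumerate_iff] at ha
  obtain ⟨k, hk, rfl⟩ := ha
  split at hg
  · cases hg; simp
  · cases hg


theorem scat_shift (fr : List (Int × List Int)) (h : ∀ p ∈ fr, 0 ≤ p.1) :
    ∀ (vals : List Int) (x : Option Int) (c : List (Option Int)),
      scatA (fr.map (fun p => (p.1 + 1, p.2))) vals (x :: c) = x :: scatA fr vals c := by
  induction fr with
  | nil => intro vals x c; simp [scatA]
  | cons p fr ih =>
    intro vals x c
    cases vals with
    | nil => simp [scatA]
    | cons v vs =>
      have hp : 0 ≤ p.1 := h p (List.mem_cons_self ..)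
      have hstep : PySem.List.pySetD (x :: c) (p.1 + 1) (some v) =
          x :: PySem.List.pySetD c p.1 (some v) := by
        rw [PySem.List.pySetD_of_nonneg _ _ (by omega), PySem.List.pySetD_of_nonneg _ _ hp]
        have ht : (p.1 + 1).toNat = p.1.toNat + 1 := by omega
        rw [ht]; rfl
      simp only [List.map_cons, scatA, List.zip_cons_cons, List.foldl_cons, hstep]
      exact ih (fun q hq => h q (List.mem_cons_of_mem _ hq)) vs x (PySem.List.pySetD c p.1 (some v))


theorem renderA_nil : renderA [] = "" := by
  apply String.toList_inj.mp
  simp [renderA, PySem.Str.toList_join, PySem.Chars.join_nil]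


theorem renderA_cons (o : Option Int) (cur : List (Option Int)) :
    renderA (o :: cur) = PySem.Int.toStr (o.getD 0) ++ renderA cur := by
  apply String.toList_inj.mp
  rw [String.toList_append]
  simp only [renderA, PySem.Str.toList_join, List.map_cons, PySem.Int.toList_toStr]
  cases cur with
  | nil => simp [PySem.Chars.join_singleton, PySem.Chars.join_nil]
  | cons o2 rest => simp [PySem.Chars.join_cons_cons]


theorem prodA_of_mem_nil (ls : List (List Int)) (h : [] ∈ ls) : prodA ls = [] := by
  induction ls with
  | nil => cases h
  | cons l ls ih =>
    rcases List.mem_cons.1 h with h0 | h0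
    · subst h0; simp [prodA]
    · simp [prodA, ih h0]


theorem bitCount_eq_zero (m : Int) (h : PySem.Int.bitCount m = 0) : m = 0 := by
  have bcz : ∀ n : Nat, PySem.Int.bitCount (n : Int) = 0 → n = 0 := by
    intro n
    induction n using Nat.strong_induction_on with
    | _ n ih =>
      intro hn
      rcases Nat.eq_zero_or_pos n with h0 | h0
      · exact h0
      · rw [PySem.Int.bitCount_natCast h0] at hn
        have h2 : n / 2 = 0 := ih (n / 2) (Nat.div_lt_self h0 (by omega)) (by omega)
        omega
  by_cases hm : 0 ≤ m
  · have : m = ((m.toNat : Nat) : Int) := by omega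
    rw [this] at h
    have := bcz _ h
    omega
  · replace hm : m < 0 := by omega
    have hneg : PySem.Int.bitCount (-m) = PySem.Int.bitCount m := by
      have := PySem.Int.bitCount_neg m
      omega
    have : -m = (((-m).toNat : Nat) : Int) := by omega
    rw [← hneg, this] at h
    have := bcz _ h
    omega


theorem mem_freeVals (ms : List Int) (m' : Int) (hm : m' ∈ ms)
    (hbc : 1 < PySem.Int.bitCount m') : mask_values m' ∈ (freeA ms).map (fun p => p.2) := by
  obtain ⟨k, hk, rfl⟩ := List.mem_iff_getElem.1 hm
  refine List.mem_map.2 ⟨((0 : Int) + k, mask_values ms[k]), ?_, rfl⟩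
  refine List.mem_filterMap.2 ⟨((0 : Int) + k, ms[k]), ?_, ?_⟩
  · exact (PySem.List.mem_enumerate_iff _ _ _).2 ⟨k, hk, rfl⟩
  · simp [hbc]


theorem scatA_cons (i : Int) (ls : List Int) (fr : List (Int × List Int)) (v : Int)
    (vs : List Int) (c : List (Option Int)) :
    scatA ((i, ls) :: fr) (v :: vs) c = scatA fr vs (PySem.List.pySetD c i (some v)) := rfl

theorem pySetD_zero_cons (x : Option Int) (c : List (Option Int)) (v : Option Int) :
    PySem.List.pySetD (x :: c) (0 : Int) v = v :: c := by
  rw [PySem.List.pySetD_of_nonneg _ _ le_rfl]; rfl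

theorem A_eq_bRec (dom : List Int)
    (h1 : ∀ m ∈ dom, ¬(PySem.Int.bitCount m = 1 ∧ (mask_values m).length ≠ 1))
    (h2 : (0 : Int) ∈ dom → ∃ m ∈ dom, 1 < PySem.Int.bitCount m ∧ mask_values m = []) :
    iter_domain_completions dom = bRec dom := by
  induction dom with
  | nil =>
    simp [iter_domain_completions, freeA, fixedA, PySem.List.enumerate_nil, prodA, scatA,
      renderA_nil, bRec]
  | cons m ms ih =>
    have h1' : ∀ x ∈ ms, ¬(PySem.Int.bitCount x = 1 ∧ (mask_values x).length ≠ 1) :=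
      fun x hx => h1 x (List.mem_cons_of_mem _ hx)
    simp only [iter_domain_completions]
    by_cases hbc : 1 < PySem.Int.bitCount m
    · have hfree : freeA (m :: ms) =
          ((0 : Int), mask_values m) :: (freeA ms).map (fun p => (p.1 + 1, p.2)) := by
        rw [freeA_cons]; simp [hbc]
      have hfix : fixedA (m :: ms) = none :: fixedA ms := by
        simp [fixedA, show ¬ PySem.Int.bitCount m = 1 by omega]
      by_cases hmv : mask_values m = []
      · rw [hfree]
        simp [prodA, hmv, bRec, mask_values_b_eq]
      · have h2' : (0 : Int) ∈ ms →
            ∃ m' ∈ ms, 1 < PySem.Int.bitCount m' ∧ mask_values m' = [] := by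
          intro h0
          obtain ⟨m', hm', hb', hv'⟩ := h2 (List.mem_cons_of_mem _ h0)
          rcases List.mem_cons.1 hm' with rfl | hm''
          · exact absurd hv' hmv
          · exact ⟨m', hm'', hb', hv'⟩
        have ihe : (prodA ((freeA ms).map (fun p => p.2))).map
            (fun vals => renderA (scatA (freeA ms) vals (fixedA ms))) = bRec ms := ih h1' h2'
        rw [hfree, hfix]
        simp only [List.map_cons, List.map_map, bRec, mask_values_b_eq, prodA,
          List.map_flatMap]
        congr 1
        funext v
        simp only [Function.comp_def, scatA_cons, pySetD_zero_cons,
          scat_shift _ (freeA_nonneg ms), renderA_cons, Option.getD_some]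
        rw [← ihe, List.map_map]
        rfl
    · by_cases hbc1 : PySem.Int.bitCount m = 1
      · obtain ⟨v0, hmv⟩ : ∃ v0, mask_values m = [v0] := by
          have hlen : (mask_values m).length = 1 := by
            by_contra hne; exact h1 m (List.mem_cons_self ..) ⟨hbc1, hne⟩
          exact List.length_eq_one_iff.1 hlen
        have hsv : singleton_mask_value m = some v0 := by
          simp [singleton_mask_value, hmv, PySem.List.pyGet?, PySem.List.pyIdx?]
        have h2' : (0 : Int) ∈ ms →
            ∃ m' ∈ ms, 1 < PySem.Int.bitCount m' ∧ mask_values m' = [] := by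
          intro h0
          obtain ⟨m', hm', hb', hv'⟩ := h2 (List.mem_cons_of_mem _ h0)
          rcases List.mem_cons.1 hm' with rfl | hm''
          · omega
          · exact ⟨m', hm'', hb', hv'⟩
        have ihe : (prodA ((freeA ms).map (fun p => p.2))).map
            (fun vals => renderA (scatA (freeA ms) vals (fixedA ms))) = bRec ms := ih h1' h2'
        have hfree : freeA (m :: ms) = (freeA ms).map (fun p => (p.1 + 1, p.2)) := by
          rw [freeA_cons]; simp [hbc]
        have hfix : fixedA (m :: ms) = some v0 :: fixedA ms := by
          simp [fixedA, hbc1, hsv]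
        rw [hfree, hfix]
        simp only [List.map_map, Function.comp_def, bRec, mask_values_b_eq, hmv,
          List.flatMap_cons, List.flatMap_nil, List.append_nil]
        simp only [scat_shift _ (freeA_nonneg ms), renderA_cons, Option.getD_some]
        rw [← ihe, List.map_map]
        rfl
      · have hm0 : m = 0 := bitCount_eq_zero m (by omega)
        subst hm0
        obtain ⟨m', hm', hb', hv'⟩ := h2 (List.mem_cons_self ..)
        have hm'' : m' ∈ ms := by
          rcases List.mem_cons.1 hm' with rfl | h
          · exact absurd hb' hbc
          · exact h
        have hfree : freeA ((0 : Int) :: ms) = (freeA ms).map (fun p => (p.1 + 1, p.2)) := by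
          rw [freeA_cons]; simp
        have hprod : prodA (((freeA ms).map (fun p => (p.1 + 1, p.2))).map (fun p => p.2)) = [] := by
          rw [List.map_map]
          refine prodA_of_mem_nil _ ?_
          rw [← hv']
          simpa using mem_freeVals ms m' hm'' hb'
        rw [hfree, hprod]
        simp [bRec, show mask_values_b 0 = [] from by decide]

-- ===== VERDICT (by name: the statement is the Claim_ definition above) =====
theorem iter_domain_completions_spec : Claim_equal_iter_domain_completions := by
  intro dom _ hpre
  unfold Spec_iter_domain_completions
  rw [alt_eq_bRec, A_eq_bRec]
  · intro m hm; have := hpre.1 m hm; rwa [pvMV_eq] at this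
  · intro h0
    obtain ⟨m, hm, hbc, hmv⟩ := hpre.2 h0
    exact ⟨m, hm, hbc, by rwa [pvMV_eq] at hmv⟩
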